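-- pv_equiv track=rewrite | github.com/quentin12200/outilspapv2 | app/core/pagination.py | _page_sequence
-- ===== SOURCE A (Python) =====
-- from typing import Dict, Generic, List, Optional, Sequence, Tuple, TypeVar, Union
--
-- def _page_sequence(current: int, total: int, radius: int = 2) -> List[Optional[int]]:
--     pages: List[Optional[int]] = []
--     for page in range(1, total + 1):
--         if page == 1 or page == total or abs(page - current) <= radius:
--             pages.append(page)
--         elif pages and pages[-1] is not None:
--             pages.append(None)
--     return pages
-- ===== SOURCE B (Python) =====
-- from typing import List, Optional
--
-- def _page_sequence(current: int, total: int, radius: int = 2) -> List[Optional[int]]: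
--     if total < 1:
--         return []
--     if total == 1:
--         return [1]
--     lo = max(2, current - radius)
--     hi = min(total - 1, current + radius)
--     pages: List[Optional[int]] = [1]
--     if lo > hi:
--         if total > 2:
--             pages.append(None)
--     else:
--         if lo > 2:
--             pages.append(None)
--         pages.extend(range(lo, hi + 1))
--         if hi < total - 1:
--             pages.append(None)
--     pages.append(total)
--     return pages
-- ===== Notes on version B (the rewrite author's own statement) =====
-- stated objective: faster
-- what changed: B emits the page list directly from the endpoints and the clamped window [max(2,current-radius), min(total-1,current+radius)] with at most two ellipsis gaps, instead of scanning every page 1..total.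
import Mathlib
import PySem

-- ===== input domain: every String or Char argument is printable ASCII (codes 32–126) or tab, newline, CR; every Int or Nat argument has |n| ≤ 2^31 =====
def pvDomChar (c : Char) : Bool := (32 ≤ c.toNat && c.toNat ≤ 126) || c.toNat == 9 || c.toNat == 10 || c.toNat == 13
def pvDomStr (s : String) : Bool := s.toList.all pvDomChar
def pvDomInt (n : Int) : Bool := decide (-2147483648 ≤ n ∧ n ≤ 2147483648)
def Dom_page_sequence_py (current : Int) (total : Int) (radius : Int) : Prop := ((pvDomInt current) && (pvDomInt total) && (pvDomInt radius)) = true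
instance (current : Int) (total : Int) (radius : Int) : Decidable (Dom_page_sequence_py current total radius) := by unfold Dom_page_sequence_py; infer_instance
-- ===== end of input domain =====

-- B builds the sequence from the endpoints and the clamped window directly (O(radius+output)) instead of scanning all pages (O(total)).

-- ===== PORT A =====
-- the loop body of A: append included pages, else one None after a non-None tail
def pvStepA (current : Int) (total : Int) (radius : Int)
    (pages : List (Option Int)) (page : Int) : List (Option Int) :=
  if page = 1 ∨ page = total ∨ |page - current| ≤ radius then
    pages ++ [some page]
  else if pages ≠ [] ∧ PySem.List.pyGet? pages (-1) ≠ some none then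
    pages ++ [none]
  else
    pages

def page_sequence_py (current : Int) (total : Int) (radius : Int) : List (Option Int) :=
  (PySem.List.pyRange 1 (total + 1) 1).foldl (pvStepA current total radius) []

-- ===== PORT B =====
def page_sequence_py_alt (current : Int) (total : Int) (radius : Int) : List (Option Int) :=
  if total < 1 then []
  else if total = 1 then [some 1]
  else
    let lo := max 2 (current - radius)
    let hi := min (total - 1) (current + radius)
    if lo > hi then
      [some 1] ++ (if total > 2 then [none] else []) ++ [some total]
    else
      [some 1] ++ (if lo > 2 then [none] else [])
        ++ (PySem.List.pyRange lo (hi + 1) 1).map some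
        ++ (if hi < total - 1 then [none] else [])
        ++ [some total]

-- ===== PRECONDITION & SPEC =====
def Spec_page_sequence_py (current : Int) (total : Int) (radius : Int) (out : List (Option Int)) : Prop := out = page_sequence_py_alt current total radius
instance (current : Int) (total : Int) (radius : Int) (out : List (Option Int)) : Decidable (Spec_page_sequence_py current total radius out) := by unfold Spec_page_sequence_py; infer_instance

-- ===== CLAIM (what is proved, stated in full; the proofs are below) =====
def Claim_equal_page_sequence_py : Prop := ∀ (current : Int) (total : Int) (radius : Int), Dom_page_sequence_py current total radius → Spec_page_sequence_py current total radius (page_sequence_py current total radius)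

-- ===== LEMMAS AND PROOFS =====

-- a nonempty integer range is not []
lemma pvRange_ne_nil {a b : Int} (h : a < b) : PySem.List.pyRange a b 1 ≠ [] := by
  intro hnil
  have ha : a ∈ PySem.List.pyRange a b 1 := by rw [PySem.List.mem_pyRange_one]; omega
  rw [hnil] at ha
  simp at ha

-- over a run of excluded pages, a state ending in `none` is unchanged
lemma foldl_excl_none (c t r : Int) (l : List Int) (s : List (Option Int))
    (hx : ∀ p ∈ l, ¬ (p = 1 ∨ p = t ∨ |p - c| ≤ r))
    (hl : s.getLast? = some none) :
    l.foldl (pvStepA c t r) s = s := by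
  induction l with
  | nil => rfl
  | cons p rest ih =>
    have hp := hx p (by simp)
    have hstep : pvStepA c t r s p = s := by
      unfold pvStepA
      rw [if_neg hp, if_neg]
      rintro ⟨-, h2⟩
      exact h2 (by rw [PySem.List.pyGet?_neg_one, hl])
    simp only [List.foldl_cons, hstep]
    exact ih (fun q hq => hx q (by simp [hq]))

-- over a run of excluded pages, a state ending in a page gains exactly one `none` (if the run is nonempty)
lemma foldl_excl (c t r : Int) (l : List Int) (s : List (Option Int)) (x : Int)
    (hx : ∀ p ∈ l, ¬ (p = 1 ∨ p = t ∨ |p - c| ≤ r)) :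
    l.foldl (pvStepA c t r) (s ++ [some x]) =
      s ++ [some x] ++ (if l = [] then [] else [none]) := by
  cases l with
  | nil => simp
  | cons p rest =>
    have hp := hx p (by simp)
    have hstep : pvStepA c t r (s ++ [some x]) p = (s ++ [some x]) ++ [none] := by
      unfold pvStepA
      rw [if_neg hp, if_pos]
      constructor
      · simp
      · rw [PySem.List.pyGet?_neg_one_append_singleton]; simp
    simp only [List.foldl_cons, hstep]
    rw [foldl_excl_none c t r rest _ (fun q hq => hx q (by simp [hq])) (by simp)]
    simp

-- over a run of included pages, every page is appended
lemma foldl_incl (c t r : Int) (l : List Int) (s : List (Option Int))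
    (hx : ∀ p ∈ l, (p = 1 ∨ p = t ∨ |p - c| ≤ r)) :
    l.foldl (pvStepA c t r) s = s ++ l.map some := by
  induction l generalizing s with
  | nil => simp
  | cons p rest ih =>
    have hstep : pvStepA c t r s p = s ++ [some p] := by
      unfold pvStepA
      rw [if_pos (hx p (by simp))]
    simp only [List.foldl_cons, hstep]
    rw [ih _ (fun q hq => hx q (by simp [hq]))]
    simp

-- ===== VERDICT (by name: the statement is the Claim_ definition above) =====
theorem page_sequence_py_spec : Claim_equal_page_sequence_py := by
  intro c t r _
  unfold Spec_page_sequence_py page_sequence_py page_sequence_py_alt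
  by_cases ht : t < 1
  · rw [if_pos ht, PySem.List.pyRange_one_eq_nil (by omega)]
    rfl
  by_cases ht1 : t = 1
  · -- total = 1
    rw [if_neg (by omega), if_pos (by omega)]
    have : PySem.List.pyRange 1 (t + 1) 1 = [1] := by
      rw [ht1]; exact PySem.List.pyRange_one_singleton 1
    rw [this]
    simp [pvStepA]
  · -- total ≥ 2
    have ht2 : 2 ≤ t := by omega
    rw [if_neg (by omega), if_neg (by omega)]
    set lo := max 2 (c - r) with hlo
    set hi := min (t - 1) (c + r) with hhi
    have hmid : ∀ p, 2 ≤ p → p ≤ t - 1 →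
        ((p = 1 ∨ p = t ∨ |p - c| ≤ r) ↔ (lo ≤ p ∧ p ≤ hi)) := by
      intro p h2 h3
      rw [abs_le]
      omega
    have hsplit1 : PySem.List.pyRange 1 (t + 1) 1
        = 1 :: (PySem.List.pyRange 2 t 1 ++ [t]) := by
      rw [PySem.List.pyRange_one_cons (by omega)]
      rw [show (1 : Int) + 1 = 2 by norm_num]
      rw [PySem.List.pyRange_one_succ_right (by omega)]
    rw [hsplit1]
    simp only [List.foldl_cons, List.foldl_append]
    have hfirst : pvStepA c t r [] 1 = [some 1] := by
      unfold pvStepA; rw [if_pos (by left; rfl)]; rfl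
    rw [hfirst]
    by_cases hwin : lo > hi
    · -- window empty: middle pages 2..t-1 are all excluded
      rw [if_pos hwin]
      have hexc : ∀ p ∈ PySem.List.pyRange 2 t 1, ¬ (p = 1 ∨ p = t ∨ |p - c| ≤ r) := by
        intro p hp
        rw [PySem.List.mem_pyRange_one] at hp
        rw [hmid p (by omega) (by omega)]
        omega
      rw [show ([some 1] : List (Option Int)) = [] ++ [some 1] by rfl]
      rw [foldl_excl c t r _ [] 1 hexc]
      have hlast : ∀ s : List (Option Int), pvStepA c t r s t = s ++ [some t] := by
        intro s; unfold pvStepA; rw [if_pos (by right; left; rfl)]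
      rw [hlast]
      by_cases h2 : t > 2
      · rw [if_pos h2, if_neg (pvRange_ne_nil (by omega))]
        simp
      · rw [if_neg h2, if_pos (PySem.List.pyRange_one_eq_nil (by omega))]
        simp
    · -- window nonempty: 2 ≤ lo ≤ hi ≤ t-1
      rw [if_neg hwin]
      rw [not_lt] at hwin
      have hb1 : (2:Int) ≤ lo := by omega
      have hb2 : hi ≤ t - 1 := by omega
      have hsplit2 : PySem.List.pyRange 2 t 1
          = PySem.List.pyRange 2 lo 1 ++ (PySem.List.pyRange lo (hi+1) 1
            ++ PySem.List.pyRange (hi+1) t 1) := by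
        rw [PySem.List.pyRange_one_append 2 lo t (by omega) (by omega),
            PySem.List.pyRange_one_append lo (hi+1) t (by omega) (by omega)]
      rw [hsplit2]
      simp only [List.foldl_append]
      have hexc1 : ∀ p ∈ PySem.List.pyRange 2 lo 1, ¬ (p = 1 ∨ p = t ∨ |p - c| ≤ r) := by
        intro p hp
        rw [PySem.List.mem_pyRange_one] at hp
        rw [hmid p (by omega) (by omega)]
        omega
      rw [show ([some 1] : List (Option Int)) = [] ++ [some 1] by rfl]
      rw [foldl_excl c t r _ [] 1 hexc1]
      have hincl : ∀ p ∈ PySem.List.pyRange lo (hi+1) 1, (p = 1 ∨ p = t ∨ |p - c| ≤ r) := by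
        intro p hp
        rw [PySem.List.mem_pyRange_one] at hp
        rw [hmid p (by omega) (by omega)]
        omega
      rw [foldl_incl c t r _ _ hincl]
      have hmidrange : (PySem.List.pyRange lo (hi+1) 1).map (some : Int → Option Int)
          = (PySem.List.pyRange lo hi 1).map some ++ [some hi] := by
        rw [PySem.List.pyRange_one_succ_right (by omega)]
        simp
      have hexc2 : ∀ p ∈ PySem.List.pyRange (hi+1) t 1, ¬ (p = 1 ∨ p = t ∨ |p - c| ≤ r) := by
        intro p hp
        rw [PySem.List.mem_pyRange_one] at hp
        rw [hmid p (by omega) (by omega)]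
        omega
      rw [hmidrange, ← List.append_assoc, foldl_excl c t r _ _ hi hexc2]
      have hlast : ∀ s : List (Option Int), pvStepA c t r s t = s ++ [some t] := by
        intro s; unfold pvStepA; rw [if_pos (by right; left; rfl)]
      rw [hlast]
      by_cases hg1 : lo > 2
      · rw [if_pos hg1, if_neg (pvRange_ne_nil (by omega))]
        by_cases hg2 : hi < t - 1
        · rw [if_pos hg2, if_neg (pvRange_ne_nil (by omega))]
          simp
        · rw [if_neg hg2, if_pos (PySem.List.pyRange_one_eq_nil (by omega))]
          simp
      · rw [if_neg hg1, if_pos (PySem.List.pyRange_one_eq_nil (by omega))]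
        by_cases hg2 : hi < t - 1
        · rw [if_pos hg2, if_neg (pvRange_ne_nil (by omega))]
          simp
        · rw [if_neg hg2, if_pos (PySem.List.pyRange_one_eq_nil (by omega))]
          simp
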